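-- pv_equiv track=rewrite | github.com/dreary-dugong/advent22 | day8/2/python/solution.py | old_get_direction_scores
-- ===== SOURCE A (Python) =====
-- def old_get_direction_scores(forest):
--     """given a forest, return the left component of the visibility score"""
--     nrows = len(forest)
--     ncols = len(forest[0])
--
--     # matrix  of scores we've found so far to speed up finding the next one
--     scores = [[0 for _ in range(ncols)] for _ in range(nrows)]
--     for row_index in range(nrows):
--         for col_index in range(ncols):
--
--             if col_index == 0:
--                 cur_score = 0
--             else:
--                 cur_height = forest[row_index][col_index]
--                 neighbor_height = forest[row_index][col_index - 1]
--                 if neighbor_height >= cur_height: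
--                     cur_score = 1
--                 else:
--                     neighbor_score = scores[row_index][col_index - 1]
--                     cur_score = neighbor_score + 1
--
--             scores[row_index][col_index] = cur_score
--
--     return scores
-- ===== SOURCE B (Python) =====
-- def old_get_direction_scores(forest):
--     """given a forest, return the left component of the visibility score"""
--     ncols = len(forest[0])
--     scores = []
--     for row in forest:
--         # columns whose left neighbor blocks the view
--         breaks = [c for c in range(1, ncols) if row[c - 1] >= row[c]]
--         bounds = [0] + breaks + [ncols]
--         # first run: the view reaches the left edge, scores count up from 0
--         out = list(range(bounds[1]))
--         # each later run restarts at 1 just after its blocking column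
--         for start, stop in zip(bounds[1:], bounds[2:]):
--             out.extend(range(1, stop - start + 1))
--         scores.append(out)
--     return scores
-- ===== Notes on version B (the rewrite author's own statement) =====
-- stated objective: alternative
-- what changed: Replaces the memoized cell-by-cell recurrence over a preallocated scores matrix with a staged per-row computation: first collect the 'break' columns where the left neighbor blocks the view, then emit the score row as runs of consecutive integers between breaks (0..k for the first run, 1..k after each break).
import Mathlib
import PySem

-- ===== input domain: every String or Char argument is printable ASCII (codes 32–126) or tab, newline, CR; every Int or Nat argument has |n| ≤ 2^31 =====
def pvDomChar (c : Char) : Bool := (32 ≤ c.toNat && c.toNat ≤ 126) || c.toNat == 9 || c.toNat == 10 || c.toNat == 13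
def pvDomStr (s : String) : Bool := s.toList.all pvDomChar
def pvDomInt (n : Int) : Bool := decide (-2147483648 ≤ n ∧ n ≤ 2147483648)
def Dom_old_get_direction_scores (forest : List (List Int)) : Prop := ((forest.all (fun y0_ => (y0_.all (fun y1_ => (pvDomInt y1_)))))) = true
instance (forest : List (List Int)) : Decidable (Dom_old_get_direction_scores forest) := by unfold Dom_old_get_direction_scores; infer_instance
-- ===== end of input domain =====

-- B replaces A's memoized cell-by-cell recurrence over a preallocated matrix with a
-- staged per-row computation: collect the break columns, then emit runs of
-- consecutive integers between them. Same cost, different algorithm.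

-- ===== PORT A =====
-- literal transliteration of A: build a zero matrix, then nested index loops
-- updating scores[row_index][col_index] in place (reads via getD; indices are in
-- range on every input admitted by Pre_, where Python A returns normally).
def old_get_direction_scores (forest : List (List Int)) : List (List Int) :=
  let nrows := forest.length
  let ncols := (forest.headD []).length
  let scores := List.replicate nrows (List.replicate ncols (0 : Int))
  (List.range nrows).foldl (fun scores row_index =>
    (List.range ncols).foldl (fun scores col_index =>
      let cur_score : Int :=
        if col_index = 0 then 0
        else
          let cur_height := (forest.getD row_index []).getD col_index 0
          let neighbor_height := (forest.getD row_index []).getD (col_index - 1) 0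
          if neighbor_height ≥ cur_height then 1
          else (scores.getD row_index []).getD (col_index - 1) 0 + 1
      scores.set row_index ((scores.getD row_index []).set col_index cur_score))
      scores)
    scores

-- ===== PORT B =====
-- the per-row body of B: breaks = [c for c in range(1, ncols) if row[c-1] >= row[c]],
-- bounds = [0] + breaks + [ncols], out = list(range(bounds[1])), then
-- out.extend(range(1, stop - start + 1)) for (start, stop) in zip(bounds[1:], bounds[2:])
def pvRowRuns (row : List Int) (ncols : Nat) : List Int :=
  let breaks := (List.range' 1 (ncols - 1)).filter
      (fun c => row.getD (c - 1) 0 ≥ row.getD c 0)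
  let bounds : List Nat := 0 :: (breaks ++ [ncols])
  let out := (List.range (bounds.getD 1 0)).map (fun c => Int.ofNat c)
  (List.zip bounds.tail bounds.tail.tail).foldl
    (fun out p => out ++ (List.range' 1 (p.2 - p.1)).map (fun s => Int.ofNat s)) out

def old_get_direction_scores_alt (forest : List (List Int)) : List (List Int) :=
  let ncols := (forest.headD []).length
  forest.map (fun row => pvRowRuns row ncols)

-- ===== PRECONDITION & SPEC =====
-- Pre_ is exactly where Python A returns: forest nonempty (else forest[0] raises
-- IndexError), and when ncols = len(forest[0]) ≥ 2 every row at least as long as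
-- row 0 (else forest[r][c] raises IndexError for some 1 ≤ c < ncols; for ncols ≤ 1
-- A never indexes into the rows, so it returns even on ragged input). B raises on
-- exactly the same inputs.
def Pre_old_get_direction_scores (forest : List (List Int)) : Prop :=
  forest ≠ [] ∧ ∀ r ∈ forest, (forest.headD []).length ≤ 1 ∨ (forest.headD []).length ≤ r.length
instance (forest : List (List Int)) : Decidable (Pre_old_get_direction_scores forest) := by
  unfold Pre_old_get_direction_scores; infer_instance

def pvWitness_old_get_direction_scores : List (List Int) := [[3, 0, 3], [2, 5, 1]]

def Spec_old_get_direction_scores (forest : List (List Int)) (out : List (List Int)) : Prop := out = old_get_direction_scores_alt forest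
instance (forest : List (List Int)) (out : List (List Int)) : Decidable (Spec_old_get_direction_scores forest out) := by unfold Spec_old_get_direction_scores; infer_instance

-- ===== CLAIM (what is proved, stated in full; the proofs are below) =====
def Claim_equal_old_get_direction_scores : Prop := ∀ (forest : List (List Int)), Dom_old_get_direction_scores forest → Pre_old_get_direction_scores forest → Spec_old_get_direction_scores forest (old_get_direction_scores forest)

-- ===== LEMMAS AND PROOFS =====

-- A's per-cell recurrence, as a per-row function (proof-side characterisation of A)
def pvGo (prevH prevS : Int) : List Int → List Int
  | [] => []
  | h :: rest =>
      let s : Int := if prevH ≥ h then 1 else prevS + 1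
      s :: pvGo h s rest

def pvRowScores : List Int → List Int
  | [] => []
  | h :: rest => 0 :: pvGo h 0 rest

theorem pvGo_length (prevH prevS : Int) (ys : List Int) :
    (pvGo prevH prevS ys).length = ys.length := by
  induction ys generalizing prevH prevS with
  | nil => rfl
  | cons y rest ih => simp [pvGo, ih]

theorem pvRowScores_length (r : List Int) : (pvRowScores r).length = r.length := by
  cases r with
  | nil => rfl
  | cons h rest => simp [pvRowScores, pvGo_length]

theorem pvGo_getD (ys : List Int) (prevH prevS : Int) (c : Nat) (hc : c < ys.length) :
    (pvGo prevH prevS ys).getD c 0 =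
      if (prevH :: ys).getD c 0 ≥ ys.getD c 0 then 1
      else ((prevS :: pvGo prevH prevS ys).getD c 0) + 1 := by
  induction ys generalizing prevH prevS c with
  | nil => simp at hc
  | cons y rest ih =>
      cases c with
      | zero => simp [pvGo]
      | succ k =>
          have hk : k < rest.length := by simpa using hc
          simpa [pvGo] using ih y (if prevH ≥ y then 1 else prevS + 1) k hk

theorem pvRowScores_getD (r : List Int) (c : Nat) (hc : c < r.length) (hc0 : c ≠ 0) :
    (pvRowScores r).getD c 0 =
      if r.getD (c - 1) 0 ≥ r.getD c 0 then 1 else (pvRowScores r).getD (c - 1) 0 + 1 := by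
  cases r with
  | nil => simp at hc
  | cons h rest =>
      cases c with
      | zero => exact absurd rfl hc0
      | succ k =>
          have hk : k < rest.length := by simpa using hc
          simpa [pvRowScores] using pvGo_getD rest h 0 k hk

theorem pvGo_take (ys : List Int) (prevH prevS : Int) (k : Nat) :
    (pvGo prevH prevS ys).take k = pvGo prevH prevS (ys.take k) := by
  induction ys generalizing prevH prevS k with
  | nil => simp [pvGo]
  | cons y rest ih =>
      cases k with
      | zero => simp only [List.take_zero]; rfl
      | succ m => simp [pvGo, ih]

theorem pvRowScores_take (r : List Int) (k : Nat) :
    (pvRowScores r).take k = pvRowScores (r.take k) := by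
  cases r with
  | nil => simp [pvRowScores]
  | cons h rest =>
      cases k with
      | zero => simp [pvRowScores]
      | succ m => simp [pvRowScores, pvGo_take]

-- the inner column loop of A only touches row ri of the matrix
theorem set_foldl (L : List Nat) (s : List (List Int)) (ri : Nat)
    (g : Nat → List Int → List Int) (hri : ri < s.length) :
    L.foldl (fun s c => s.set ri (g c (s.getD ri []))) s
      = s.set ri (L.foldl (fun row c => g c row) (s.getD ri [])) := by
  induction L generalizing s with
  | nil => simp [hri]
  | cons c L ih =>
      have hlen : ri < (s.set ri (g c (s.getD ri []))).length := by simpa using hri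
      have := ih (s.set ri (g c (s.getD ri []))) hlen
      simp only [List.foldl_cons]
      rw [this]
      have hget : (s.set ri (g c (s.getD ri []))).getD ri [] = g c (s.getD ri []) := by
        simp [List.getD, hri]
      rw [hget, List.set_set]

-- set_foldl with A's concrete per-column update, stated beta-reduced for rewriting
theorem set_foldl' (L : List Nat) (s : List (List Int)) (ri : Nat) (r : List Int)
    (hri : ri < s.length) :
    L.foldl (fun s c => s.set ri ((s.getD ri []).set c
        (if c = 0 then (0:Int)
         else if r.getD (c - 1) 0 ≥ r.getD c 0 then 1
         else (s.getD ri []).getD (c - 1) 0 + 1))) s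
      = s.set ri (L.foldl (fun row c => row.set c
        (if c = 0 then (0:Int)
         else if r.getD (c - 1) 0 ≥ r.getD c 0 then 1
         else row.getD (c - 1) 0 + 1)) (s.getD ri [])) :=
  set_foldl L s ri (fun c row => row.set c
    (if c = 0 then (0:Int)
     else if r.getD (c - 1) 0 ≥ r.getD c 0 then 1
     else row.getD (c - 1) 0 + 1)) hri

-- the inner column loop on a single score row computes pvRowScores of the row prefix
theorem inner_row (r : List Int) (ncols : Nat) (hr : ncols ≤ r.length) :
    ∀ k, k ≤ ncols →
    (List.range k).foldl (fun srow c =>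
        srow.set c (if c = 0 then (0 : Int)
          else if r.getD (c - 1) 0 ≥ r.getD c 0 then 1 else srow.getD (c - 1) 0 + 1))
      (List.replicate ncols 0)
      = pvRowScores (r.take k) ++ List.replicate (ncols - k) 0 := by
  intro k
  induction k with
  | zero => intro _; simp [pvRowScores]
  | succ k ih =>
      intro hk
      have hk' : k ≤ ncols := Nat.le_of_succ_le hk
      have hkr : k < r.length := lt_of_lt_of_le hk hr
      rw [List.range_succ, List.foldl_append, ih hk']
      simp only [List.foldl_cons, List.foldl_nil]
      have hlenrs : (pvRowScores (r.take k)).length = k := by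
        rw [pvRowScores_length, List.length_take]; omega
      -- value written at column k
      set prev := pvRowScores (r.take k) ++ List.replicate (ncols - k) (0:Int) with hprev
      have hgetprev : ∀ j, j < k → prev.getD j 0 = (pvRowScores r).getD j 0 := by
        intro j hj
        rw [hprev, List.getD, List.getElem?_append_left (by omega), ← List.getD]
        rw [← pvRowScores_take r k, List.getD, List.getD, List.getElem?_take_of_lt hj]
      have hval : (if (k:Nat) = 0 then (0:Int)
          else if r.getD (k - 1) 0 ≥ r.getD k 0 then 1 else prev.getD (k - 1) 0 + 1)
          = (pvRowScores r).getD k 0 := by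
        by_cases hk0 : k = 0
        · subst hk0
          cases r with
          | nil => simp at hkr
          | cons h rest => simp [pvRowScores]
        · rw [if_neg hk0, hgetprev (k-1) (by omega), pvRowScores_getD r k hkr hk0]
      rw [hval]
      -- performing the set at index k
      have hsplit : prev = pvRowScores (r.take k) ++ ((0:Int) :: List.replicate (ncols - k - 1) 0) := by
        rw [hprev]
        congr 1
        have : ncols - k = (ncols - k - 1) + 1 := by omega
        rw [this, List.replicate_succ]
        simp
      rw [hsplit]
      have hset : (pvRowScores (r.take k) ++ ((0:Int) :: List.replicate (ncols - k - 1) 0)).set k ((pvRowScores r).getD k 0)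
          = pvRowScores (r.take k) ++ (((pvRowScores r).getD k 0) :: List.replicate (ncols - k - 1) 0) := by
        rw [List.set_append_right _ _ (by omega), hlenrs]
        simp
      rw [hset]
      have htake : pvRowScores (r.take (k+1)) = pvRowScores (r.take k) ++ [(pvRowScores r).getD k 0] := by
        rw [← pvRowScores_take, ← pvRowScores_take]
        have hklt : k < (pvRowScores r).length := by rw [pvRowScores_length]; omega
        rw [List.take_add_one]
        congr 1
        rw [List.getD, List.getElem?_eq_getElem hklt]
        simp
      rw [htake]
      have : ncols - (k+1) = ncols - k - 1 := by omega
      rw [this]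
      simp

-- the outer row loop: each row is processed independently from a zero row
theorem outer_loop (forest : List (List Int))
    (hPre : ∀ r ∈ forest, (forest.headD []).length ≤ r.length) :
    ∀ n, n ≤ forest.length →
    (List.range n).foldl (fun scores row_index =>
      (List.range (forest.headD []).length).foldl (fun scores col_index =>
        scores.set row_index ((scores.getD row_index []).set col_index
          (if col_index = 0 then (0:Int)
           else if (forest.getD row_index []).getD (col_index - 1) 0 ≥ (forest.getD row_index []).getD col_index 0 then 1
           else (scores.getD row_index []).getD (col_index - 1) 0 + 1)))
        scores)
      (List.replicate forest.length (List.replicate (forest.headD []).length 0))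
      = (forest.take n).map (fun row => pvRowScores (row.take (forest.headD []).length))
        ++ List.replicate (forest.length - n) (List.replicate (forest.headD []).length 0) := by
  intro n
  set ncols := (forest.headD []).length with hncols
  induction n with
  | zero => intro _; simp
  | succ n ih =>
      intro hn
      have hn' : n ≤ forest.length := Nat.le_of_succ_le hn
      have hnlt : n < forest.length := hn
      rw [List.range_succ, List.foldl_append, ih hn']
      simp only [List.foldl_cons, List.foldl_nil]
      set prev := (forest.take n).map (fun row => pvRowScores (row.take ncols))
        ++ List.replicate (forest.length - n) (List.replicate ncols (0:Int)) with hprev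
      have hfirstlen : ((forest.take n).map (fun row => pvRowScores (row.take ncols))).length = n := by
        rw [List.length_map, List.length_take]; omega
      have hprevlen : prev.length = forest.length := by
        rw [hprev, List.length_append, hfirstlen, List.length_replicate]; omega
      have hgetn : prev.getD n [] = List.replicate ncols (0:Int) := by
        rw [hprev, List.getD, List.getElem?_append_right (le_of_eq hfirstlen), hfirstlen,
            Nat.sub_self, List.getElem?_replicate, if_pos (by omega)]
        rfl
      -- collapse the inner loop to a computation on row n
      rw [set_foldl' (List.range ncols) prev n (forest.getD n []) (by omega), hgetn]
      have hrmem : forest.getD n [] ∈ forest := by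
        rw [List.getD, List.getElem?_eq_getElem hnlt]; exact List.getElem_mem hnlt
      have hrlen : ncols ≤ (forest.getD n []).length := hPre _ hrmem
      rw [inner_row (forest.getD n []) ncols hrlen ncols (le_refl _)]
      simp only [Nat.sub_self, List.replicate_zero, List.append_nil]
      -- perform the set at row n
      have hsplit : prev = (forest.take n).map (fun row => pvRowScores (row.take ncols))
          ++ (List.replicate ncols (0:Int) :: List.replicate (forest.length - n - 1) (List.replicate ncols 0)) := by
        rw [hprev]
        congr 1
        have : forest.length - n = (forest.length - n - 1) + 1 := by omega
        rw [this, List.replicate_succ]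
        simp
      rw [hsplit, List.set_append_right _ _ (by omega), hfirstlen]
      simp only [Nat.sub_self, List.set_cons_zero]
      have htake : (forest.take (n+1)).map (fun row => pvRowScores (row.take ncols))
          = (forest.take n).map (fun row => pvRowScores (row.take ncols))
            ++ [pvRowScores ((forest.getD n []).take ncols)] := by
        rw [List.take_add_one, List.map_append]
        congr 1
        rw [List.getD, List.getElem?_eq_getElem hnlt]
        simp
      rw [htake]
      have : forest.length - (n+1) = forest.length - n - 1 := by omega
      rw [this]
      simp

-- with ncols = 1 the column loop only writes the preallocated 0 at column 0: the
-- scores matrix never changes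
theorem set_zero_fold_id (n : Nat) (L : List Nat) :
    L.foldl (fun s ri => s.set ri ((s.getD ri []).set 0 (0:Int)))
      (List.replicate n [(0:Int)]) = List.replicate n [(0:Int)] := by
  induction L with
  | nil => rfl
  | cons c L ih =>
      have hstep : (List.replicate n [(0:Int)]).set c
          (((List.replicate n [(0:Int)]).getD c []).set 0 0) = List.replicate n [(0:Int)] := by
        by_cases hc : c < n
        · have hg : (List.replicate n [(0:Int)]).getD c [] = [0] := by
            rw [List.getD, List.getElem?_replicate, if_pos hc]; rfl
          rw [hg]
          exact List.set_replicate_self ..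
        · have hg : (List.replicate n [(0:Int)]).getD c [] = [] := by
            rw [List.getD, List.getElem?_replicate, if_neg hc]; rfl
          rw [hg]
          exact List.set_eq_of_length_le (by simpa using Nat.le_of_not_lt hc)
      simp only [List.foldl_cons, hstep, ih]

theorem A_ncols_one (forest : List (List Int)) (h1 : (forest.headD []).length = 1) :
    old_get_direction_scores forest = List.replicate forest.length [(0:Int)] := by
  simp only [old_get_direction_scores, h1, List.range_one, List.foldl_cons, List.foldl_nil,
    List.replicate_one, reduceIte]
  exact set_zero_fold_id forest.length (List.range forest.length)

-- B-side structure lemmas: the zip/extend loop produces the chain of runs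
def pvChain : Nat → List Nat → List Int
  | _, [] => []
  | prev, b :: rest => (List.range' 1 (b - prev)).map (fun s => Int.ofNat s) ++ pvChain b rest

def pvBreaks (row : List Int) (n : Nat) : List Nat :=
  (List.range' 1 (n - 1)).filter (fun c => row.getD (c - 1) 0 ≥ row.getD c 0)

def pvOut : List Nat → Nat → List Int
  | [], n => (List.range n).map (fun c => Int.ofNat c)
  | b :: bs, n => (List.range b).map (fun c => Int.ofNat c) ++ pvChain b (bs ++ [n])

theorem zip_flatMap_chain (bs : List Nat) (b : Nat) :
    (List.zip (b :: bs) bs).flatMap (fun p => (List.range' 1 (p.2 - p.1)).map (fun s => Int.ofNat s))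
      = pvChain b bs := by
  induction bs generalizing b with
  | nil => rfl
  | cons c rest ih => simp [pvChain, ← ih c]

theorem pvRowRuns_eq_pvOut (row : List Int) (n : Nat) :
    pvRowRuns row n = pvOut (pvBreaks row n) n := by
  have h : pvRowRuns row n =
      ((List.range ((0 :: (pvBreaks row n ++ [n])).getD 1 0)).map (fun c => Int.ofNat c)) ++
      (List.zip (pvBreaks row n ++ [n]) (pvBreaks row n ++ [n]).tail).flatMap
        (fun p => (List.range' 1 (p.2 - p.1)).map (fun s => Int.ofNat s)) := by
    simp only [pvRowRuns, pvBreaks, List.tail_cons, PySem.List.foldl_append_eq_flatMap]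
  rw [h]
  cases hb : pvBreaks row n with
  | nil => simp [pvOut]
  | cons b bs =>
      simp only [List.cons_append, List.tail_cons, List.getD, List.getElem?_cons_succ,
        List.getElem?_cons_zero, Option.getD_some, pvOut]
      rw [zip_flatMap_chain]

-- extension lemmas for pvOut as the column count grows by one
theorem pvChain_snoc_break (bs : List Nat) (b n : Nat) :
    pvChain b (bs ++ [n, n + 1]) = pvChain b (bs ++ [n]) ++ [(1 : Int)] := by
  induction bs generalizing b with
  | nil => simp [pvChain]
  | cons c rest ih => simp [pvChain, ih c]

theorem pvOut_snoc_break (breaks : List Nat) (n : Nat) :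
    pvOut (breaks ++ [n]) (n + 1) = pvOut breaks n ++ [(1 : Int)] := by
  cases breaks with
  | nil => simp [pvOut, pvChain]
  | cons b bs => simp [pvOut, pvChain_snoc_break]

theorem pvChain_snoc_no_break (bs : List Nat) (b n : Nat) (hL : (b :: bs).getLast (by simp) ≤ n) :
    pvChain b (bs ++ [n + 1])
      = pvChain b (bs ++ [n]) ++ [((n - (b :: bs).getLast (by simp) + 1 : Nat) : Int)] := by
  induction bs generalizing b with
  | nil =>
      simp only [List.getLast_singleton] at hL ⊢
      have h1 : n + 1 - b = (n - b) + 1 := by omega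
      have h2 : 1 + 1 * (n - b) = n - b + 1 := by omega
      simp only [List.nil_append, pvChain, h1, List.range'_concat, h2, List.map_append,
        List.append_nil]
      simp [Int.ofNat_eq_natCast]
  | cons c rest ih =>
      have hL' : (c :: rest).getLast (by simp) ≤ n := by
        simpa [List.getLast_cons] using hL
      simp only [List.cons_append, pvChain]
      rw [ih c hL']
      simp [List.getLast_cons]

theorem pvOut_snoc_no_break_nil (n : Nat) :
    pvOut ([] : List Nat) (n + 1) = pvOut [] n ++ [((n : Nat) : Int)] := by
  simp [pvOut, List.range_succ]

theorem pvOut_snoc_no_break (b : Nat) (bs : List Nat) (n : Nat)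
    (hL : (b :: bs).getLast (by simp) ≤ n) :
    pvOut (b :: bs) (n + 1)
      = pvOut (b :: bs) n ++ [((n - (b :: bs).getLast (by simp) + 1 : Nat) : Int)] := by
  simp only [pvOut, List.append_assoc]
  rw [pvChain_snoc_no_break bs b n hL]

-- last element of pvOut: the distance back to the last break (or to the edge)
theorem pvChain_getLast? (bs : List Nat) (b n : Nat) (hL : (b :: bs).getLast (by simp) < n) :
    (pvChain b (bs ++ [n])).getLast? = some (((n - (b :: bs).getLast (by simp) : Nat)) : Int) := by
  induction bs generalizing b with
  | nil =>
      simp only [List.getLast_singleton] at hL ⊢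
      have h1 : n - b = (n - b - 1) + 1 := by omega
      rw [List.nil_append, pvChain, pvChain, List.append_nil, h1, List.range'_concat]
      have h2 : 1 + 1 * (n - b - 1) = n - b := by omega
      rw [h2]
      simp [Int.ofNat_eq_natCast]
      omega
  | cons c rest ih =>
      have hL' : (c :: rest).getLast (by simp) < n := by
        simpa [List.getLast_cons] using hL
      simp only [List.cons_append, pvChain]
      rw [List.getLast?_append]
      rw [ih c hL']
      simp [List.getLast_cons]

theorem pvBreaks_mem_lt (row : List Int) (n : Nat) (c : Nat) (hc : c ∈ pvBreaks row n) :
    1 ≤ c ∧ c < n := by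
  unfold pvBreaks at hc
  have := List.mem_of_mem_filter hc
  rw [List.mem_range'] at this
  omega

-- step for pvBreaks: column n is appended iff row[n-1] >= row[n]
theorem pvBreaks_succ (row : List Int) (n : Nat) (hn : 1 ≤ n) :
    pvBreaks row (n + 1)
      = pvBreaks row n ++ (if row.getD (n - 1) 0 ≥ row.getD n 0 then [n] else []) := by
  unfold pvBreaks
  have h1 : n + 1 - 1 = (n - 1) + 1 := by omega
  rw [h1, List.range'_concat]
  have h2' : 1 + 1 * (n - 1) = n := by omega
  rw [h2', List.filter_append]
  congr 1
  by_cases h : row.getD (n - 1) 0 ≥ row.getD n 0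
  · rw [if_pos h]
    have h' : row[n]?.getD 0 ≤ row[n - 1]?.getD 0 := h
    simp [h']
  · rw [if_neg h]
    have h' : ¬ row[n]?.getD 0 ≤ row[n - 1]?.getD 0 := h
    simp [h']

-- the main per-row equivalence: B's run construction equals A's recurrence
theorem pvOut_eq_pvRowScores (row : List Int) :
    ∀ n, n ≤ row.length → pvOut (pvBreaks row n) n = pvRowScores (row.take n) := by
  intro n
  induction n with
  | zero => intro _; simp [pvBreaks, pvOut, pvRowScores]
  | succ n ih =>
      intro hn
      have hn' : n ≤ row.length := Nat.le_of_succ_le hn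
      by_cases hn0 : n = 0
      · subst hn0
        cases row with
        | nil => simp at hn
        | cons h rest => simp [pvBreaks, pvOut, pvRowScores, pvGo, List.range_one]
      · have hn1 : 1 ≤ n := by omega
        have hnr : n < row.length := hn
        -- A side appended value
        have hlen : (pvRowScores (row.take n)).length = n := by
          rw [pvRowScores_length, List.length_take]; omega
        have hAtake : pvRowScores (row.take (n+1))
            = pvRowScores (row.take n) ++ [(pvRowScores row).getD n 0] := by
          rw [← pvRowScores_take, ← pvRowScores_take]
          have hklt : n < (pvRowScores row).length := by rw [pvRowScores_length]; omega
          rw [List.take_add_one]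
          congr 1
          rw [List.getD, List.getElem?_eq_getElem hklt]
          simp
        have hArec := pvRowScores_getD row n hnr hn0
        have hAprev : (pvRowScores row).getD (n-1) 0 = (pvRowScores (row.take n)).getD (n-1) 0 := by
          rw [← pvRowScores_take row n, List.getD, List.getD, List.getElem?_take_of_lt (by omega)]
        rw [pvBreaks_succ row n hn1, hAtake, hArec, hAprev]
        by_cases hbr : row.getD (n - 1) 0 ≥ row.getD n 0
        · rw [if_pos hbr, if_pos hbr, pvOut_snoc_break, ih hn']
        · rw [if_neg hbr, if_neg hbr, List.append_nil]
          cases hB : pvBreaks row n with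
          | nil =>
              have ihe := ih hn'
              rw [hB] at ihe
              rw [pvOut_snoc_no_break_nil, ihe]
              congr 1
              -- last of pvOut [] n is n-1
              have hgd : (pvRowScores (row.take n)).getD (n-1) 0 = ((n - 1 : Nat) : Int) := by
                rw [← ihe]
                simp only [pvOut, List.getD]
                rw [List.getElem?_map, List.getElem?_range (by omega)]
                simp [Int.ofNat_eq_natCast]
              rw [hgd]
              congr 1
              omega
          | cons b bs =>
              have hLlt : (b :: bs).getLast (by simp) < n := by
                have hmem : (b :: bs).getLast (by simp) ∈ pvBreaks row n := by
                  rw [hB]; exact List.getLast_mem _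
                exact (pvBreaks_mem_lt row n _ hmem).2
              have ihe := ih hn'
              rw [hB] at ihe
              rw [pvOut_snoc_no_break b bs n (le_of_lt hLlt), ihe]
              congr 1
              -- last of pvOut (b::bs) n is n - L
              have hlast : (pvRowScores (row.take n)).getLast?
                  = some (((n - (b :: bs).getLast (by simp) : Nat)) : Int) := by
                rw [← ihe]
                simp only [pvOut]
                rw [List.getLast?_append]
                rw [pvChain_getLast? bs b n hLlt]
                simp
              have h3 : (pvRowScores (row.take n))[n-1]?
                  = some (((n - (b :: bs).getLast (by simp) : Nat)) : Int) := by
                have h2 : (pvRowScores (row.take n)).getLast?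
                    = (pvRowScores (row.take n))[(pvRowScores (row.take n)).length - 1]? :=
                  List.getLast?_eq_getElem?
                rw [hlen] at h2
                rw [← h2, hlast]
              have hgd : (pvRowScores (row.take n)).getD (n-1) 0
                  = ((n - (b :: bs).getLast (by simp) : Nat) : Int) := by
                simp [List.getD, h3]
              rw [hgd]
              congr 1

-- per-row equality for the degenerate widths where rows may be shorter than ncols
theorem pvRowRuns_zero (row : List Int) : pvRowRuns row 0 = [] := by
  rw [pvRowRuns_eq_pvOut]
  simp [pvBreaks, pvOut]

theorem pvRowRuns_one (row : List Int) : pvRowRuns row 1 = [0] := by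
  rw [pvRowRuns_eq_pvOut]
  simp [pvBreaks, pvOut, List.range_one]

-- ===== VERDICT (by name: the statement is the Claim_ definition above) =====
theorem old_get_direction_scores_spec : Claim_equal_old_get_direction_scores := by
  intro forest _ hPre
  obtain ⟨hne, hrows'⟩ := hPre
  unfold Spec_old_get_direction_scores
  by_cases hnc : (forest.headD []).length ≤ 1
  · interval_cases h : (forest.headD []).length
    · -- ncols = 0: every row truncates to []
      have hrows : ∀ r ∈ forest, (forest.headD []).length ≤ r.length := by
        intro r hr; omega
      simp only [old_get_direction_scores, old_get_direction_scores_alt]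
      rw [outer_loop forest hrows forest.length (le_refl _)]
      simp only [Nat.sub_self, List.replicate_zero, List.append_nil, List.take_length]
      apply List.map_congr_left
      intro r _
      rw [h, pvRowRuns_zero]
      simp [pvRowScores]
    · -- ncols = 1: A leaves the zero matrix, B emits [0] per row
      rw [A_ncols_one forest h]
      simp only [old_get_direction_scores_alt, h]
      symm
      rw [List.eq_replicate_iff]
      refine ⟨by simp, ?_⟩
      intro b hb
      rw [List.mem_map] at hb
      obtain ⟨r, _, rfl⟩ := hb
      exact pvRowRuns_one r
  · have hrows : ∀ r ∈ forest, (forest.headD []).length ≤ r.length := by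
      intro r hr
      rcases hrows' r hr with h | h
      · omega
      · exact h
    simp only [old_get_direction_scores, old_get_direction_scores_alt]
    rw [outer_loop forest hrows forest.length (le_refl _)]
    simp only [Nat.sub_self, List.replicate_zero, List.append_nil, List.take_length]
    apply List.map_congr_left
    intro r hr
    rw [pvRowRuns_eq_pvOut, pvOut_eq_pvRowScores r _ (hrows r hr)]
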